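-- pv_equiv track=rewrite | github.com/Clearvoting/clearvoting | sync.py | _parse_bill_ref
-- ===== SOURCE A (Python) =====
-- def _parse_bill_ref(document: str) -> str | None:
--     """Parse bill document strings into normalized refs.
--
--     Examples: 'H.R. 1' -> 'hr-1', 'S. 100' -> 's-100',
--               'H.J.Res. 42' -> 'hjres-42', 'H.Res. 5' -> 'hres-5',
--               'H.Con.Res. 14' -> 'hconres-14'
--     """
--     doc = document.strip()
--     prefixes = [
--         ("H.Con.Res. ", "hconres-"),
--         ("S.Con.Res. ", "sconres-"),
--         ("H.J.Res. ", "hjres-"),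
--         ("S.J.Res. ", "sjres-"),
--         ("H.Res. ", "hres-"),
--         ("S.Res. ", "sres-"),
--         ("H.R. ", "hr-"),
--         ("S. ", "s-"),
--     ]
--     for prefix, ref_prefix in prefixes:
--         if doc.startswith(prefix):
--             return f"{ref_prefix}{doc[len(prefix):]}"
--     return None
-- ===== SOURCE B (Python) =====
-- _STEMS = {
--     "H.Con.Res.": "hconres",
--     "S.Con.Res.": "sconres",
--     "H.J.Res.": "hjres",
--     "S.J.Res.": "sjres",
--     "H.Res.": "hres",
--     "S.Res.": "sres",
--     "H.R.": "hr",
--     "S.": "s",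
-- }
--
--
-- def _parse_bill_ref(document: str) -> str | None:
--     parts = document.strip().split(" ", 1)
--     if len(parts) != 2:
--         return None
--     stem = _STEMS.get(parts[0])
--     if stem is None:
--         return None
--     return f"{stem}-{parts[1]}"
-- ===== Notes on version B (the rewrite author's own statement) =====
-- stated objective: simpler
-- what changed: Replaces A's ordered loop over eight startswith-prefix checks (with slicing off each prefix length) by a single split on the first space plus one dict lookup keyed on the exact dotted leading token.
import Mathlib
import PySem

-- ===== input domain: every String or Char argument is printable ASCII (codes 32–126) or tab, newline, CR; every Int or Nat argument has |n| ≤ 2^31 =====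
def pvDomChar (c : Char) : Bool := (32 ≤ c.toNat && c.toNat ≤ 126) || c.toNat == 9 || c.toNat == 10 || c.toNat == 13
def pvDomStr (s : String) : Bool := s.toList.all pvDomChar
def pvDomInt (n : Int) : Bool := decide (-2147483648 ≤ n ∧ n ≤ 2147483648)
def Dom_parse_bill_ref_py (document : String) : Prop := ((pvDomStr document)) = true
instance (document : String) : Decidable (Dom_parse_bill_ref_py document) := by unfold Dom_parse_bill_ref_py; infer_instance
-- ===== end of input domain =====

-- B replaces A's ordered prefix-startswith loop by a first-space split plus a dict lookup
-- keyed on the exact dotted token (objective: simpler); same return value everywhere.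

-- ===== PORT A =====
def pvPrefixesA : List (String × String) :=
  [("H.Con.Res. ", "hconres-"), ("S.Con.Res. ", "sconres-"),
   ("H.J.Res. ", "hjres-"), ("S.J.Res. ", "sjres-"),
   ("H.Res. ", "hres-"), ("S.Res. ", "sres-"),
   ("H.R. ", "hr-"), ("S. ", "s-")]

def pvLoopA : List (String × String) → String → Option String
  | [], _ => none
  | (p, rp) :: rest, doc =>
    if PySem.Str.startswith doc p then
      some (rp ++ PySem.Str.slice doc (some (PySem.Str.len p)) none)
    else pvLoopA rest doc

def parse_bill_ref_py (document : String) : Option String :=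
  pvLoopA pvPrefixesA (PySem.Str.strip document)

-- ===== PORT B =====
def pvStems : PySem.Dict String String :=
  PySem.Dict.ofList
    [("H.Con.Res.", "hconres"), ("S.Con.Res.", "sconres"),
     ("H.J.Res.", "hjres"), ("S.J.Res.", "sjres"),
     ("H.Res.", "hres"), ("S.Res.", "sres"),
     ("H.R.", "hr"), ("S.", "s")]

def parse_bill_ref_py_alt (document : String) : Option String :=
  match PySem.Str.splitMax? (PySem.Str.strip document) " " 1 with
  | some [tok, rest] =>
      match PySem.Dict.get? pvStems tok with
      | some stem => some (stem ++ "-" ++ rest)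
      | none => none
  | _ => none

-- ===== PRECONDITION & SPEC =====
def Spec_parse_bill_ref_py (document : String) (out : Option String) : Prop := out = parse_bill_ref_py_alt document
instance (document : String) (out : Option String) : Decidable (Spec_parse_bill_ref_py document out) := by unfold Spec_parse_bill_ref_py; infer_instance

-- ===== CLAIM (what is proved, stated in full; the proofs are below) =====
def Claim_equal_parse_bill_ref_py : Prop := ∀ (document : String), Dom_parse_bill_ref_py document → Spec_parse_bill_ref_py document (parse_bill_ref_py document)

-- ===== LEMMAS AND PROOFS =====

theorem pv_goZero (fuel : ℕ) (l cur : List Char) (acc : List (List Char)) :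
    PySem.Chars.splitOnMax.go [' '] fuel 0 l cur acc = ((cur.reverse ++ l) :: acc).reverse := by
  cases fuel <;> cases l <;> simp [PySem.Chars.splitOnMax.go]

theorem pv_goOne (l : List Char) : ∀ (fuel : ℕ) (cur : List Char) (acc : List (List Char)),
    l.length ≤ fuel →
    PySem.Chars.splitOnMax.go [' '] fuel 1 l cur acc =
      if ' ' ∈ l then
        acc.reverse ++ [cur.reverse ++ l.takeWhile (· ≠ ' '), (l.dropWhile (· ≠ ' ')).tail]
      else acc.reverse ++ [cur.reverse ++ l] := by
  induction l with
  | nil =>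
    intro fuel cur acc _
    cases fuel <;> simp [PySem.Chars.splitOnMax.go]
  | cons c rest ih =>
    intro fuel cur acc h
    cases fuel with
    | zero => simp at h
    | succ f =>
      by_cases hc : c = ' '
      · subst hc
        simp [PySem.Chars.splitOnMax.go, pv_goZero, List.isPrefixOf]
      · have hlen : rest.length ≤ f := by simpa using h
        simp [PySem.Chars.splitOnMax.go, List.isPrefixOf, Ne.symm hc,
              ih f (c :: cur) acc hlen, hc]

theorem pv_splitStr (s : String) :
    PySem.Str.splitMax? s " " 1 =
      some (if ' ' ∈ s.toList then
              [String.ofList (s.toList.takeWhile (· ≠ ' ')),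
               String.ofList ((s.toList.dropWhile (· ≠ ' ')).tail)]
            else [String.ofList s.toList]) := by
  unfold PySem.Str.splitMax? PySem.Chars.splitMax? PySem.Chars.splitOnMax
  rw [show (" ":String).toList = [' '] from rfl]
  norm_num
  rw [pv_goOne s.toList (s.length + 1) [] [] (by simp)]
  split_ifs <;> simp

theorem pv_splitSpace (l : List Char) (h : ' ' ∈ l) :
    l = l.takeWhile (· ≠ ' ') ++ ' ' :: (l.dropWhile (· ≠ ' ')).tail := by
  induction l with
  | nil => simp at h
  | cons c rest ih =>
    by_cases hc : c = ' '
    · subst hc; simp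
    · have hr : ' ' ∈ rest := by simpa [Ne.symm hc] using h
      simpa [hc] using ih hr

theorem pv_tw (t r : List Char) (ht : ' ' ∉ t) :
    (t ++ ' ' :: r).takeWhile (· ≠ ' ') = t ∧ (t ++ ' ' :: r).dropWhile (· ≠ ' ') = ' ' :: r := by
  induction t with
  | nil => simp
  | cons c cs ih =>
    have hc : c ≠ ' ' := fun h => ht (by simp [h])
    have h2 := ih (fun h => ht (by simp [h]))
    simp only [List.cons_append, List.takeWhile_cons, List.dropWhile_cons]
    simpa [hc] using h2

theorem pv_startsTok (q t r : List Char) (hq : ' ' ∉ q) (ht : ' ' ∉ t) :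
    PySem.Chars.startswith (t ++ ' ' :: r) (q ++ [' ']) = decide (q = t) := by
  by_cases h : q = t
  · subst h
    have : PySem.Chars.startswith (q ++ ' ' :: r) (q ++ [' ']) = true :=
      (PySem.Chars.startswith_iff _ _).mpr ⟨r, by simp⟩
    simp [this]
  · have hfalse : ¬ (q ++ [' ']) <+: (t ++ ' ' :: r) := by
      intro hp
      obtain ⟨s, hs⟩ := hp
      have h2 : (q ++ ' ' :: s).takeWhile (· ≠ ' ') = q := (pv_tw q s hq).1
      have hs' : q ++ ' ' :: s = t ++ ' ' :: r := by simpa using hs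
      rw [hs', (pv_tw t r ht).1] at h2
      exact h h2.symm
    have hsf : PySem.Chars.startswith (t ++ ' ' :: r) (q ++ [' ']) = false := by
      rw [← Bool.not_eq_true, PySem.Chars.startswith_iff]
      exact hfalse
    simp [hsf, h]

-- ===== VERDICT (by name: the statement is the Claim_ definition above) =====
theorem parse_bill_ref_py_spec : Claim_equal_parse_bill_ref_py := by
  intro document _
  show parse_bill_ref_py document = parse_bill_ref_py_alt document
  unfold parse_bill_ref_py parse_bill_ref_py_alt
  set doc := PySem.Str.strip document with hdoc
  rw [pv_splitStr]
  by_cases hsp : ' ' ∈ doc.toList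
  · set t := doc.toList.takeWhile (· ≠ ' ') with htdef
    set r := (doc.toList.dropWhile (· ≠ ' ')).tail with hrdef
    have hl : doc.toList = t ++ ' ' :: r := pv_splitSpace _ hsp
    have ht : ' ' ∉ t := fun hm => by simpa using List.mem_takeWhile_imp hm
    have hsw : ∀ (p q : String), p.toList = q.toList ++ [' '] → ' ' ∉ q.toList →
        PySem.Str.startswith doc p = decide (q.toList = t) := by
      intro p q hpq hq
      show PySem.Chars.startswith doc.toList p.toList = _
      rw [hl, hpq, pv_startsTok _ _ _ hq ht]
    have hsl : ∀ (p : String), p.toList.length = t.length + 1 →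
        PySem.Str.slice doc (some (PySem.Str.len p)) none = String.ofList r := by
      intro p hp
      apply String.ext
      rw [PySem.Str.toList_slice, PySem.Chars.slice_eq_listSlice,
          PySem.List.slice_from doc.toList (a := PySem.Str.len p) (by simp [PySem.Str.len])]
      have hn : (PySem.Str.len p).toNat = (t ++ [' ']).length := by
        simp [PySem.Str.len, hp]
      rw [hn, hl, show t ++ ' ' :: r = (t ++ [' ']) ++ r by simp, List.drop_left]
      simp
    have hmk : ∀ (k : String), ¬ (k.toList = t) → (k == String.ofList t) = false := by
      intro k hk
      simp only [beq_eq_false_iff_ne, ne_eq]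
      intro he
      exact hk (by rw [he]; simp)
    have hget : ∀ (k : String), k.toList = t → String.ofList t = k := by
      intro k hk; apply String.ext; simp [hk]
    have hitems : pvStems.items =
        [("H.Con.Res.", "hconres"), ("S.Con.Res.", "sconres"),
         ("H.J.Res.", "hjres"), ("S.J.Res.", "sjres"),
         ("H.Res.", "hres"), ("S.Res.", "sres"),
         ("H.R.", "hr"), ("S.", "s")] := by rfl
    simp only [if_pos hsp, pvLoopA, pvPrefixesA]
    rw [hsw "H.Con.Res. " "H.Con.Res." (by decide) (by decide),
        hsw "S.Con.Res. " "S.Con.Res." (by decide) (by decide),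
        hsw "H.J.Res. " "H.J.Res." (by decide) (by decide),
        hsw "S.J.Res. " "S.J.Res." (by decide) (by decide),
        hsw "H.Res. " "H.Res." (by decide) (by decide),
        hsw "S.Res. " "S.Res." (by decide) (by decide),
        hsw "H.R. " "H.R." (by decide) (by decide),
        hsw "S. " "S." (by decide) (by decide)]
    by_cases c1 : ("H.Con.Res." : String).toList = t
    · rw [if_pos (by simp only [decide_eq_true_eq]; exact c1), hsl "H.Con.Res. " (by rw [← c1]; decide), hget _ c1,
          show PySem.Dict.get? pvStems "H.Con.Res." = some "hconres" from by decide]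
      exact congrArg some (String.ext (by simp))
    rw [if_neg (by simp only [decide_eq_true_eq]; exact c1)]
    by_cases c2 : ("S.Con.Res." : String).toList = t
    · rw [if_pos (by simp only [decide_eq_true_eq]; exact c2), hsl "S.Con.Res. " (by rw [← c2]; decide), hget _ c2,
          show PySem.Dict.get? pvStems "S.Con.Res." = some "sconres" from by decide]
      exact congrArg some (String.ext (by simp))
    rw [if_neg (by simp only [decide_eq_true_eq]; exact c2)]
    by_cases c3 : ("H.J.Res." : String).toList = t
    · rw [if_pos (by simp only [decide_eq_true_eq]; exact c3), hsl "H.J.Res. " (by rw [← c3]; decide), hget _ c3,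
          show PySem.Dict.get? pvStems "H.J.Res." = some "hjres" from by decide]
      exact congrArg some (String.ext (by simp))
    rw [if_neg (by simp only [decide_eq_true_eq]; exact c3)]
    by_cases c4 : ("S.J.Res." : String).toList = t
    · rw [if_pos (by simp only [decide_eq_true_eq]; exact c4), hsl "S.J.Res. " (by rw [← c4]; decide), hget _ c4,
          show PySem.Dict.get? pvStems "S.J.Res." = some "sjres" from by decide]
      exact congrArg some (String.ext (by simp))
    rw [if_neg (by simp only [decide_eq_true_eq]; exact c4)]
    by_cases c5 : ("H.Res." : String).toList = t
    · rw [if_pos (by simp only [decide_eq_true_eq]; exact c5), hsl "H.Res. " (by rw [← c5]; decide), hget _ c5,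
          show PySem.Dict.get? pvStems "H.Res." = some "hres" from by decide]
      exact congrArg some (String.ext (by simp))
    rw [if_neg (by simp only [decide_eq_true_eq]; exact c5)]
    by_cases c6 : ("S.Res." : String).toList = t
    · rw [if_pos (by simp only [decide_eq_true_eq]; exact c6), hsl "S.Res. " (by rw [← c6]; decide), hget _ c6,
          show PySem.Dict.get? pvStems "S.Res." = some "sres" from by decide]
      exact congrArg some (String.ext (by simp))
    rw [if_neg (by simp only [decide_eq_true_eq]; exact c6)]
    by_cases c7 : ("H.R." : String).toList = t
    · rw [if_pos (by simp only [decide_eq_true_eq]; exact c7), hsl "H.R. " (by rw [← c7]; decide), hget _ c7,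
          show PySem.Dict.get? pvStems "H.R." = some "hr" from by decide]
      exact congrArg some (String.ext (by simp))
    rw [if_neg (by simp only [decide_eq_true_eq]; exact c7)]
    by_cases c8 : ("S." : String).toList = t
    · rw [if_pos (by simp only [decide_eq_true_eq]; exact c8), hsl "S. " (by rw [← c8]; decide), hget _ c8,
          show PySem.Dict.get? pvStems "S." = some "s" from by decide]
      exact congrArg some (String.ext (by simp))
    rw [if_neg (by simp only [decide_eq_true_eq]; exact c8)]
    simp [PySem.Dict.get?, hitems, hmk "H.Con.Res." c1, hmk "S.Con.Res." c2,
          hmk "H.J.Res." c3, hmk "S.J.Res." c4, hmk "H.Res." c5, hmk "S.Res." c6,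
          hmk "H.R." c7, hmk "S." c8]
  · have hf : ∀ (p : List Char), ' ' ∈ p → PySem.Chars.startswith doc.toList p = false := by
      intro p hp
      rw [← Bool.not_eq_true, PySem.Chars.startswith_iff]
      intro hpre
      exact hsp (hpre.subset hp)
    simp [pvLoopA, pvPrefixesA, hsp, hf]
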